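-- pv_equiv track=rewrite | github.com/giacomoaccursi/YATP | portfolio/history.py | _get_holdings_from_cache
-- ===== SOURCE A (Python) =====
-- def _get_holdings_from_cache(date, df, cache):
--     """Get holdings at a date using the pre-computed cache.
--
--     If the exact date is in the cache, use it.
--     Otherwise find the latest cached date before this date.
--     """
--     if date in cache:
--         return dict(cache[date])
--
--     # Find latest date in cache that is <= date
--     cached_dates = sorted(cache.keys())
--     best = None
--     for d in cached_dates:
--         if d <= date:
--             best = d
--         else:
--             break
--
--     if best is not None:
--         return dict(cache[best])
--     return {}
-- ===== SOURCE B (Python) =====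
-- def _get_holdings_from_cache(date, df, cache):
--     """Get holdings at the latest cached date <= date, via one binary search.
--
--     Sort the keys once, binary-search for the insertion point of `date`
--     (rightmost), and take the key just before it; no separate exact-match
--     branch is needed, since an exact hit is simply the largest key <= date.
--     """
--     keys = sorted(cache.keys())
--     lo, hi = 0, len(keys)
--     while lo < hi:
--         mid = (lo + hi) // 2
--         if keys[mid] <= date:
--             lo = mid + 1
--         else:
--             hi = mid
--     if lo == 0:
--         return {}
--     return dict(cache[keys[lo - 1]])
-- ===== Notes on version B (the rewrite author's own statement) =====
-- stated objective: alternative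
-- what changed: Replaces A's dict-membership pre-check plus linear break-scan over the sorted keys with a single hand-written binary search for the rightmost sorted key <= date, unifying the exact-match and earlier-date cases.
import Mathlib
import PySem

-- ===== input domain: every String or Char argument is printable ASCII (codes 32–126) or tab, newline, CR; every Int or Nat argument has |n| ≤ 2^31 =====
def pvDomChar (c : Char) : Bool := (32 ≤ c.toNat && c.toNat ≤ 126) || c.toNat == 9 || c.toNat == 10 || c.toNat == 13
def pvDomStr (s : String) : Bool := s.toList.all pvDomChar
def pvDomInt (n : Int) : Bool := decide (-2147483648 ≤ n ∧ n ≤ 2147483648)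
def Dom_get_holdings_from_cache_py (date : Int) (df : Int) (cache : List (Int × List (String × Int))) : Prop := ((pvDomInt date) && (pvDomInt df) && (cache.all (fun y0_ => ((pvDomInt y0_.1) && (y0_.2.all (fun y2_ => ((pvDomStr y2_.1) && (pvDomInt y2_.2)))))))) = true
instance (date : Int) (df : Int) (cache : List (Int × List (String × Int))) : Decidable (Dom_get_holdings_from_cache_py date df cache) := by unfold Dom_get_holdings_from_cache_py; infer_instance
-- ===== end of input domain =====

-- B replaces A's dict-membership check plus linear break-scan over the sorted keys by a single
-- hand-written binary search for the rightmost key <= date (alternative decomposition; the sort dominates, so no speed claim).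


-- ===== PORT A =====
-- the 'for d in cached_dates: if d <= date: best = d else: break' loop, step for step
def pyA_loop (date : Int) : List Int → Option Int → Option Int
  | [], best => best
  | d :: ds, best => if d ≤ date then pyA_loop date ds (some d) else best

def get_holdings_from_cache_py (date : Int) (df : Int) (cache : List (Int × List (String × Int))) : List (String × Int) :=
  match (PySem.Dict.mk cache).get? date with
  | some v => v            -- if date in cache: return dict(cache[date])
  | none =>
    let cached_dates := PySem.List.sorted ((PySem.Dict.mk cache).keys) (fun x => x) false
    match pyA_loop date cached_dates none with
    | some best => ((PySem.Dict.mk cache).get? best).getD []  -- cache[best]; best is a key, so never the default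
    | none => []

-- ===== PORT B =====
-- Source B's hand-written binary-search loop 'while lo < hi: …' (indexing keys[mid] with 0 ≤ mid < len: getD is exact there)
def pyB_bsearch (date : Int) (keys : List Int) (lo hi : Nat) : Nat :=
  if _h : lo < hi then
    let mid := (lo + hi) / 2
    if keys.getD mid 0 ≤ date then pyB_bsearch date keys (mid + 1) hi
    else pyB_bsearch date keys lo mid
  else lo
termination_by hi - lo
decreasing_by all_goals omega

def get_holdings_from_cache_py_alt (date : Int) (df : Int) (cache : List (Int × List (String × Int))) : List (String × Int) :=
  let keys := PySem.List.sorted ((PySem.Dict.mk cache).keys) (fun x => x) false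
  let lo := pyB_bsearch date keys 0 keys.length
  if lo = 0 then []
  else ((PySem.Dict.mk cache).get? (keys.getD (lo - 1) 0)).getD []  -- cache[keys[lo-1]]; a key, so never the default

-- ===== PRECONDITION & SPEC =====
def Spec_get_holdings_from_cache_py (date : Int) (df : Int) (cache : List (Int × List (String × Int))) (out : List (String × Int)) : Prop := out = get_holdings_from_cache_py_alt date df cache
instance (date : Int) (df : Int) (cache : List (Int × List (String × Int))) (out : List (String × Int)) : Decidable (Spec_get_holdings_from_cache_py date df cache out) := by unfold Spec_get_holdings_from_cache_py; infer_instance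

-- ===== CLAIM (what is proved, stated in full; the proofs are below) =====
def Claim_equal_get_holdings_from_cache_py : Prop := ∀ (date : Int) (df : Int) (cache : List (Int × List (String × Int))), Dom_get_holdings_from_cache_py date df cache → Spec_get_holdings_from_cache_py date df cache (get_holdings_from_cache_py date df cache)

-- ===== LEMMAS AND PROOFS =====

-- A's break-loop returns the last element of the (≤ date)-takeWhile prefix, else the incoming best
theorem pyA_loop_eq (date : Int) (l : List Int) (b : Option Int) :
    pyA_loop date l b = ((l.takeWhile (fun d => decide (d ≤ date))).getLast?).or b := by
  induction l generalizing b with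
  | nil => simp [pyA_loop]
  | cons d ds ih =>
    by_cases h : d ≤ date
    · simp only [pyA_loop, if_pos h, ih]
      have hTW : List.takeWhile (fun d => decide (d ≤ date)) (d :: ds) =
          d :: List.takeWhile (fun d => decide (d ≤ date)) ds := by simp [h]
      rw [hTW]
      cases hds : (ds.takeWhile (fun d => decide (d ≤ date))) with
      | nil => simp
      | cons x xs =>
        rw [List.getLast?_cons_cons]
        cases hxl : (x :: xs).getLast? with
        | none => simp [List.getLast?_eq_none_iff] at hxl
        | some y => simp
    · have hTW : List.takeWhile (fun d => decide (d ≤ date)) (d :: ds) = [] := by simp [h]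
      simp [pyA_loop, h, hTW]

-- On a nondecreasing list, position i holds an element ≤ date iff i is inside the takeWhile prefix
theorem takeWhile_mem_iff (date : Int) (ks : List Int) (hpw : ks.Pairwise (· ≤ ·))
    (i : Nat) (hi : i < ks.length) :
    (ks[i] ≤ date ↔ i < (ks.takeWhile (fun d => decide (d ≤ date))).length) := by
  induction ks generalizing i with
  | nil => simp at hi
  | cons a t ih =>
    rcases List.pairwise_cons.mp hpw with ⟨ha, hpt⟩
    by_cases h : a ≤ date
    · have hTW : List.takeWhile (fun d => decide (d ≤ date)) (a :: t) =
          a :: List.takeWhile (fun d => decide (d ≤ date)) t := by simp [h]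
      rw [hTW]
      cases i with
      | zero => simpa using h
      | succ j =>
        have hj : j < t.length := by simpa using hi
        simpa using ih hpt j hj
    · have hTW : List.takeWhile (fun d => decide (d ≤ date)) (a :: t) = [] := by simp [h]
      rw [hTW]
      cases i with
      | zero => simpa using h
      | succ j =>
        have hj : j < t.length := by simpa using hi
        simp only [List.length_nil]
        constructor
        · intro hle
          exact absurd (le_trans (ha t[j] (t.get_mem ⟨j, hj⟩)) hle) h
        · omega

-- nondecreasing lists are monotone position-wise (glue for the Pairwise fact about the sorted keys)
theorem pairwise_le_getElem (l : List Int) (h : l.Pairwise (· ≤ ·)) (i j : Nat)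
    (hij : i ≤ j) (hj : j < l.length) : l[i]'(by omega) ≤ l[j] := by
  rcases Nat.eq_or_lt_of_le hij with rfl | hlt
  · exact le_refl _
  · exact List.pairwise_iff_getElem.mp h i j (by omega) hj hlt

-- binary-search invariant: with the takeWhile-prefix length trapped in [lo, hi], the loop returns it
theorem pyB_bsearch_eq (date : Int) (ks : List Int) (hpw : ks.Pairwise (· ≤ ·)) :
    ∀ fuel lo hi, hi - lo ≤ fuel → hi ≤ ks.length →
      lo ≤ (ks.takeWhile (fun d => decide (d ≤ date))).length →
      (ks.takeWhile (fun d => decide (d ≤ date))).length ≤ hi →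
      pyB_bsearch date ks lo hi = (ks.takeWhile (fun d => decide (d ≤ date))).length := by
  intro fuel
  induction fuel with
  | zero =>
    intro lo hi h1 _ h3 h4
    have : ¬ lo < hi := by omega
    rw [pyB_bsearch, dif_neg this]; omega
  | succ n ih =>
    intro lo hi h1 h2 h3 h4
    by_cases hlt : lo < hi
    · rw [pyB_bsearch, dif_pos hlt]
      have hmid1 : lo ≤ (lo + hi) / 2 := by omega
      have hmid2 : (lo + hi) / 2 < hi := by omega
      have hmlen : (lo + hi) / 2 < ks.length := by omega
      have hgd : ks.getD ((lo + hi) / 2) 0 = ks[(lo + hi) / 2] := List.getD_eq_getElem ks 0 hmlen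
      by_cases hle : ks.getD ((lo + hi) / 2) 0 ≤ date
      · rw [if_pos hle]
        have := (takeWhile_mem_iff date ks hpw _ hmlen).mp (hgd ▸ hle)
        exact ih _ _ (by omega) h2 (by omega) h4
      · rw [if_neg hle]
        have : ¬ ((lo + hi) / 2 < (ks.takeWhile (fun d => decide (d ≤ date))).length) := by
          intro hc
          exact hle (hgd ▸ (takeWhile_mem_iff date ks hpw _ hmlen).mpr hc)
        exact ih _ _ (by omega) (by omega) h3 (by omega)
    · rw [pyB_bsearch, dif_neg hlt]; omega

-- ===== VERDICT (by name: the statement is the Claim_ definition above) =====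
theorem get_holdings_from_cache_py_spec : Claim_equal_get_holdings_from_cache_py := by
  intro date df cache _
  unfold Spec_get_holdings_from_cache_py
  unfold get_holdings_from_cache_py get_holdings_from_cache_py_alt
  set ks := PySem.List.sorted ((PySem.Dict.mk cache).keys) (fun x => x) false with hks
  have hpw : ks.Pairwise (· ≤ ·) := by
    simpa using PySem.List.sorted_pairwise ((PySem.Dict.mk cache).keys) (fun x => x)
  set t := ks.takeWhile (fun d => decide (d ≤ date)) with ht
  have htlen : t.length ≤ ks.length := (List.takeWhile_sublist _).length_le
  have hb : pyB_bsearch date ks 0 ks.length = t.length :=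
    pyB_bsearch_eq date ks hpw ks.length 0 ks.length (by omega) le_rfl (Nat.zero_le _)
      ((List.takeWhile_sublist _).length_le)
  have hpre : t <+: ks := List.takeWhile_prefix _
  have hlast : 0 < t.length → t.getLast? = ks[t.length - 1]? := by
    intro h0
    obtain ⟨r, hr⟩ := hpre
    rw [List.getLast?_eq_getElem?, ← hr, List.getElem?_append_left (by omega)]
  cases hget : (PySem.Dict.mk cache).get? date with
  | some v =>
    -- date is a key: the largest key ≤ date is date itself, so B looks up date again
    have hmem : date ∈ ks := by
      rw [hks, PySem.List.mem_sorted]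
      exact PySem.Dict.mem_keys_of_mem_items _ (PySem.Dict.mem_items_of_get?_eq_some _ hget)
    rcases List.mem_iff_getElem.mp hmem with ⟨i, hi, hidate⟩
    have hipos : i < t.length := by
      have := (takeWhile_mem_iff date ks hpw i hi).mp (le_of_eq hidate)
      rw [← ht] at this; exact this
    have h0 : 0 < t.length := by omega
    have hlt : t.length - 1 < ks.length := by omega
    have hle : ks[t.length - 1]'hlt ≤ date := by
      have := (takeWhile_mem_iff date ks hpw (t.length - 1) hlt).mpr
      rw [← ht] at this; exact this (by omega)
    have hge : date ≤ ks[t.length - 1]'hlt := by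
      rw [← hidate]
      exact pairwise_le_getElem ks hpw i (t.length - 1) (by omega) hlt
    have hkey : ks[t.length - 1]'hlt = date := le_antisymm hle hge
    simp only [hb]
    rw [if_neg (by omega), List.getD_eq_getElem ks 0 hlt, hkey, hget]
    rfl
  | none =>
    simp only [hb, pyA_loop_eq, Option.or_none, ← ht]
    by_cases h0 : t.length = 0
    · have hnone : t.getLast? = none := by
        rw [List.getLast?_eq_none_iff]; exact List.length_eq_zero_iff.mp h0
      rw [hnone, if_pos h0]
    · have hlt : t.length - 1 < ks.length := by omega
      rw [hlast (by omega), List.getElem?_eq_getElem hlt, if_neg h0,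
        List.getD_eq_getElem ks 0 hlt]
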